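-- pv_equiv track=rewrite | github.com/TheGreatMacraft/FRI-VSS-zapiski | programiranje/programi/main.py | paketov
-- ===== SOURCE A (Python) =====
-- def paketov(teze,nosilnost):
--
--     st_ladji = 0
--     index = 0
--
--     for ta_nosilnost in nosilnost:
--         if index >= len(teze):
--             break
--         if ta_nosilnost < teze[index]:
--             continue
--         while index < len(teze) and ta_nosilnost - teze[index] >= 0:
--             ta_nosilnost -= teze[index]
--             index += 1
--         st_ladji += 1
--
--     return st_ladji
-- ===== SOURCE B (Python) =====
-- def paketov(teze, nosilnost):
--     ships = 0
--     k = 0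
--     m = len(nosilnost)
--     active = False
--     rem = 0
--     for w in teze:
--         if active and rem >= w:
--             rem -= w
--             continue
--         while k < m and nosilnost[k] < w:
--             k += 1
--         if k == m:
--             break
--         rem = nosilnost[k] - w
--         k += 1
--         ships += 1
--         active = True
--     return ships
-- ===== Notes on version B (the rewrite author's own statement) =====
-- stated objective: alternative
-- what changed: Inverts the loop structure: B iterates over the weights with a moving capacity pointer and an 'active ship' remainder (a two-pointer merge), instead of A's iteration over capacities with an inner subtract-while over the weights.
import Mathlib
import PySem

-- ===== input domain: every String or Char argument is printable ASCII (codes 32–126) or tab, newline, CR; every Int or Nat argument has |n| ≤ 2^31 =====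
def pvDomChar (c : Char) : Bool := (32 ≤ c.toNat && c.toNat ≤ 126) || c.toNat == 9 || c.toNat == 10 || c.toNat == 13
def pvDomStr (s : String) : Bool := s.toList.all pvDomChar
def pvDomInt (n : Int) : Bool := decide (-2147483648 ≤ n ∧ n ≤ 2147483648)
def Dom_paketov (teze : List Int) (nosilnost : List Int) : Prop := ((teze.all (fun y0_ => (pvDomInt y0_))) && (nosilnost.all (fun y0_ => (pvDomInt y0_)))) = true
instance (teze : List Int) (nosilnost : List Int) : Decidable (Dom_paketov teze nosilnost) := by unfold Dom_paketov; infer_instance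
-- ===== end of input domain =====

-- B is an alternative with the same cost: a weights-outer two-pointer loop instead of A's capacities-outer loop with an inner subtract-while.

-- ===== PORT A =====
-- inner 'while index < len(teze) and ta_nosilnost - teze[index] >= 0': returns (remaining capacity, new index)
-- getD is safe: the guard ensures index < teze.length, matching Python's in-range teze[index]
def paketovWhile (teze : List Int) (cap : Int) (index : Nat) : Int × Nat :=
  if h : index < teze.length then
    if cap - teze.getD index 0 ≥ 0 then
      paketovWhile teze (cap - teze.getD index 0) (index + 1)
    else (cap, index)
  else (cap, index)
termination_by teze.length - index
decreasing_by omega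

-- 'for ta_nosilnost in nosilnost' with state (st_ladji, index)
def paketovLoop (teze : List Int) (caps : List Int) (st : Int) (index : Nat) : Int :=
  match caps with
  | [] => st
  | c :: rest =>
    if index ≥ teze.length then st
    else if c < teze.getD index 0 then paketovLoop teze rest st index
    else paketovLoop teze rest (st + 1) (paketovWhile teze c index).2

def paketov (teze : List Int) (nosilnost : List Int) : Int :=
  paketovLoop teze nosilnost 0 0

-- ===== PORT B =====
-- 'while k < m and nosilnost[k] < w: k += 1'
def altFind (ns : List Int) (w : Int) (k : Nat) : Nat :=
  if h : k < ns.length then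
    if ns.getD k 0 < w then altFind ns w (k + 1) else k
  else k
termination_by ns.length - k
decreasing_by omega

-- 'for w in teze' with state (ships, k, active, rem)
def altLoop (ns : List Int) (ws : List Int) (ships : Int) (k : Nat) (active : Bool) (rem : Int) : Int :=
  match ws with
  | [] => ships
  | w :: rest =>
    if active = true ∧ rem ≥ w then altLoop ns rest ships k active (rem - w)
    else
      let k' := altFind ns w k
      if k' = ns.length then ships
      else altLoop ns rest (ships + 1) (k' + 1) true (ns.getD k' 0 - w)

def paketov_alt (teze : List Int) (nosilnost : List Int) : Int :=
  altLoop nosilnost teze 0 0 false 0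

-- ===== PRECONDITION & SPEC =====
def Spec_paketov (teze : List Int) (nosilnost : List Int) (out : Int) : Prop := out = paketov_alt teze nosilnost
instance (teze : List Int) (nosilnost : List Int) (out : Int) : Decidable (Spec_paketov teze nosilnost out) := by unfold Spec_paketov; infer_instance

-- ===== CLAIM (what is proved, stated in full; the proofs are below) =====
def Claim_equal_paketov : Prop := ∀ (teze : List Int) (nosilnost : List Int), Dom_paketov teze nosilnost → Spec_paketov teze nosilnost (paketov teze nosilnost)

-- ===== LEMMAS AND PROOFS =====

-- reference function: both ports equal st + pvRef (remaining weights) (remaining capacities)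
def pvConsume (cap : Int) : List Int → List Int
  | [] => []
  | w :: ws => if cap - w ≥ 0 then pvConsume (cap - w) ws else w :: ws

def pvRef : List Int → List Int → Int
  | _, [] => 0
  | [], _ :: _ => 0
  | w :: ws, c :: cs => if c < w then pvRef (w :: ws) cs else 1 + pvRef (pvConsume (c - w) ws) cs

lemma pvRef_nil_right (ws : List Int) : pvRef ws [] = 0 := by
  cases ws <;> rfl

lemma pvRef_nil_left (cs : List Int) : pvRef [] cs = 0 := by
  cases cs <;> rfl

lemma pvConsume_length (cap : Int) (ws : List Int) : (pvConsume cap ws).length ≤ ws.length := by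
  induction ws generalizing cap with
  | nil => simp [pvConsume]
  | cons w ws ih =>
    simp only [pvConsume]
    split
    · exact le_trans (ih _) (by simp)
    · simp

lemma paketovWhile_consume (teze : List Int) : ∀ fuel cap index, teze.length - index ≤ fuel →
    index ≤ teze.length →
    (paketovWhile teze cap index).2 ≤ teze.length ∧
    teze.drop (paketovWhile teze cap index).2 = pvConsume cap (teze.drop index) := by
  intro fuel
  induction fuel with
  | zero =>
    intro cap index hf hle
    have hidx : index = teze.length := by omega
    rw [paketovWhile]
    simp [hidx, pvConsume]
  | succ n ih =>
    intro cap index hf hle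
    rw [paketovWhile]
    by_cases h : index < teze.length
    · have hdrop : teze.drop index = teze[index] :: teze.drop (index + 1) :=
        List.drop_eq_getElem_cons h
      have hgetD : teze.getD index 0 = teze[index] := List.getD_eq_getElem _ _ h
      by_cases hc : cap - teze.getD index 0 ≥ 0
      · simp only [dif_pos h, if_pos hc]
        have := ih (cap - teze.getD index 0) (index + 1) (by omega) (by omega)
        refine ⟨this.1, ?_⟩
        rw [this.2, hdrop, pvConsume, hgetD]
        rw [if_pos (by omega)]
      · simp only [dif_pos h, if_neg hc]
        refine ⟨by omega, ?_⟩
        rw [hgetD] at hc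
        rw [hdrop, pvConsume, if_neg (by omega)]
    · simp only [dif_neg h]
      have hidx : index = teze.length := by omega
      simp [hidx, pvConsume]

lemma paketovLoop_ref (teze : List Int) : ∀ caps st index, index ≤ teze.length →
    paketovLoop teze caps st index = st + pvRef (teze.drop index) caps := by
  intro caps
  induction caps with
  | nil => intro st index _; simp [paketovLoop, pvRef_nil_right]
  | cons c rest ih =>
    intro st index hle
    rw [paketovLoop]
    by_cases h : index ≥ teze.length
    · have : teze.drop index = [] := List.drop_eq_nil_of_le h
      simp [h, this, pvRef]
    · have hlt : index < teze.length := by omega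
      have hdrop : teze.drop index = teze[index] :: teze.drop (index + 1) :=
        List.drop_eq_getElem_cons hlt
      have hgetD : teze.getD index 0 = teze[index] := List.getD_eq_getElem _ _ hlt
      simp only [if_neg h]
      by_cases hc : c < teze.getD index 0
      · rw [if_pos hc, ih st index hle, hdrop, pvRef, if_pos (by omega)]
      · rw [if_neg hc]
        have hw := paketovWhile_consume teze (teze.length - index) c index (by omega) hle
        rw [ih (st + 1) _ hw.1, hw.2, hdrop, pvRef, if_neg (by rw [← hgetD]; omega)]
        have : pvConsume c (teze[index] :: teze.drop (index + 1)) =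
            pvConsume (c - teze[index]) (teze.drop (index + 1)) := by
          rw [pvConsume, if_pos (by rw [← hgetD] at *; omega)]
        rw [this]
        ring

lemma altFind_spec (ns : List Int) (w : Int) (ws : List Int) :
    ∀ fuel k, ns.length - k ≤ fuel → k ≤ ns.length →
    k ≤ altFind ns w k ∧ altFind ns w k ≤ ns.length ∧
    (altFind ns w k < ns.length → ¬ ns.getD (altFind ns w k) 0 < w) ∧
    pvRef (w :: ws) (ns.drop k) = pvRef (w :: ws) (ns.drop (altFind ns w k)) := by
  intro fuel
  induction fuel with
  | zero =>
    intro k hf hle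
    have hk : k = ns.length := by omega
    rw [altFind]
    simp [hk]
  | succ n ih =>
    intro k hf hle
    rw [altFind]
    by_cases h : k < ns.length
    · have hdrop : ns.drop k = ns[k] :: ns.drop (k + 1) := List.drop_eq_getElem_cons h
      have hgetD : ns.getD k 0 = ns[k] := List.getD_eq_getElem _ _ h
      by_cases hc : ns.getD k 0 < w
      · simp only [dif_pos h, if_pos hc]
        have := ih (k + 1) (by omega) (by omega)
        refine ⟨by omega, this.2.1, this.2.2.1, ?_⟩
        rw [← this.2.2.2, hdrop, pvRef, if_pos (by rw [← hgetD]; omega)]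
      · simp only [dif_pos h, if_neg hc]
        refine ⟨?_, ?_, ?_, ?_⟩
        · exact Nat.le_refl k
        · exact Nat.le_of_lt h
        · exact fun _ => hc
        · trivial
    · simp only [dif_neg h]
      refine ⟨?_, ?_, ?_, ?_⟩
      · exact Nat.le_refl k
      · exact hle
      · exact fun hlt => absurd hlt h
      · trivial

lemma altLoop_active (ns : List Int) : ∀ ws ships k rem,
    altLoop ns ws ships k true rem = altLoop ns (pvConsume rem ws) ships k false 0 := by
  intro ws
  induction ws with
  | nil => intro ships k rem; simp [altLoop, pvConsume]
  | cons w rest ih =>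
    intro ships k rem
    rw [altLoop]
    by_cases hc : rem ≥ w
    · rw [if_pos ⟨rfl, hc⟩, ih]
      have : pvConsume rem (w :: rest) = pvConsume (rem - w) rest := by
        rw [pvConsume, if_pos (by omega)]
      rw [this]
    · have : pvConsume rem (w :: rest) = w :: rest := by
        rw [pvConsume, if_neg (by omega)]
      have h1 : ¬ (true = true ∧ rem ≥ w) := fun hx => hc hx.2
      have h2 : ¬ (false = true ∧ (0 : Int) ≥ w) := fun hx => by simp at hx
      rw [this, altLoop, if_neg h1, if_neg h2]

lemma altLoop_ref (ns : List Int) : ∀ n ws ships k, ws.length ≤ n → k ≤ ns.length →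
    altLoop ns ws ships k false 0 = ships + pvRef ws (ns.drop k) := by
  intro n
  induction n with
  | zero =>
    intro ws ships k hn _
    have : ws = [] := List.eq_nil_of_length_eq_zero (by omega)
    simp [this, altLoop, pvRef_nil_left]
  | succ n ih =>
    intro ws ships k hn hk
    match ws with
    | [] => simp [altLoop, pvRef_nil_left]
    | w :: rest =>
      rw [altLoop]
      rw [if_neg (by simp)]
      have hf := altFind_spec ns w rest (ns.length - k) k (by omega) hk
      set k' := altFind ns w k with hk'def
      by_cases hend : k' = ns.length
      · simp only [if_pos hend]
        rw [hf.2.2.2, hend, List.drop_length, pvRef_nil_right]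
        omega
      · simp only [if_neg hend]
        have hlt : k' < ns.length := by omega
        have hdrop : ns.drop k' = ns[k'] :: ns.drop (k' + 1) := List.drop_eq_getElem_cons hlt
        have hgetD : ns.getD k' 0 = ns[k'] := List.getD_eq_getElem _ _ hlt
        have hnc := hf.2.2.1 hlt
        rw [altLoop_active, ih _ _ _ (by
            have := pvConsume_length (ns.getD k' 0 - w) rest
            simp at hn; omega) (by omega)]
        rw [hf.2.2.2, hdrop, pvRef, if_neg (by rw [← hgetD]; exact hnc), hgetD]
        ring

-- ===== VERDICT (by name: the statement is the Claim_ definition above) =====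
theorem paketov_spec : Claim_equal_paketov := by
  intro teze nosilnost _
  unfold Spec_paketov paketov paketov_alt
  rw [paketovLoop_ref teze nosilnost 0 0 (by omega),
      altLoop_ref nosilnost teze.length teze 0 0 (le_refl _) (by omega)]
  simp
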